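-- pv_equiv track=rewrite | github.com/ZahraNematzadeh/VoiceProcessingProject | helper/counting_augmented_samples.py | counting_aug_samples
-- ===== SOURCE A (Python) =====
-- def counting_aug_samples(augmented_data):
--     DATA = augmented_data
--     positive_count = 0
--     negative_count = 0
--     for item in DATA:
--         label = item[2]
--         if label == "Positive":
--             positive_count += 1
--         elif label == "Negative":
--             negative_count += 1
--     test_count = positive_count + negative_count
--     return positive_count, negative_count, test_count
-- ===== SOURCE B (Python) =====
-- def counting_aug_samples(augmented_data):
--     labels = [item[2] for item in augmented_data]
--     positive_count = labels.count("Positive")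
--     negative_count = labels.count("Negative")
--     return positive_count, negative_count, positive_count + negative_count
-- ===== Notes on version B (the rewrite author's own statement) =====
-- stated objective: idiomatic
-- what changed: Replaces the single branch-guarded accumulator loop with staged passes: extract the label column once, then use list.count twice to read each tally directly.
import Mathlib
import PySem

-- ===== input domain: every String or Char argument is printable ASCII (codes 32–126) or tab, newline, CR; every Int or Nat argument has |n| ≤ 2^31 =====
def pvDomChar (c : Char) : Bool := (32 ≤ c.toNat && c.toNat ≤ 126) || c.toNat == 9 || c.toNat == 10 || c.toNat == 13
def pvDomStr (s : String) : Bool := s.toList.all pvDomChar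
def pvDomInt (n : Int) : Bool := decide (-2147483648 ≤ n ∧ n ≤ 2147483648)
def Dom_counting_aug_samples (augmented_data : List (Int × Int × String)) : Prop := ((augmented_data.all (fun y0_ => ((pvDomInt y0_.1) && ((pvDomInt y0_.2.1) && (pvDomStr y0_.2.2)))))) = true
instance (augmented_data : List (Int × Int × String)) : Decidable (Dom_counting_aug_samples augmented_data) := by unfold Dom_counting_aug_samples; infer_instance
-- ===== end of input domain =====

-- ===== PORT A =====
-- B replaces the one branch-guarded accumulator loop with staged passes: extract the label column, then two list.count reads (idiomatic; same O(n) cost).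
def counting_aug_samples (augmented_data : List (Int × Int × String)) : Int × Int × Int :=
  let counts := augmented_data.foldl
    (fun (acc : Int × Int) item =>
      let label := item.2.2
      if label == "Positive" then (acc.1 + 1, acc.2)
      else if label == "Negative" then (acc.1, acc.2 + 1)
      else acc)
    (0, 0)
  (counts.1, counts.2, counts.1 + counts.2)

-- ===== PORT B =====
def counting_aug_samples_alt (augmented_data : List (Int × Int × String)) : Int × Int × Int :=
  let labels := augmented_data.map (fun item => item.2.2)
  let positive_count : Int := PySem.List.count labels "Positive"
  let negative_count : Int := PySem.List.count labels "Negative"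
  (positive_count, negative_count, positive_count + negative_count)

-- ===== PRECONDITION & SPEC =====
def Spec_counting_aug_samples (augmented_data : List (Int × Int × String)) (out : Int × Int × Int) : Prop := out = counting_aug_samples_alt augmented_data
instance (augmented_data : List (Int × Int × String)) (out : Int × Int × Int) : Decidable (Spec_counting_aug_samples augmented_data out) := by unfold Spec_counting_aug_samples; infer_instance

-- ===== CLAIM =====
def Claim_equal_counting_aug_samples : Prop := ∀ (augmented_data : List (Int × Int × String)), Dom_counting_aug_samples augmented_data → Spec_counting_aug_samples augmented_data (counting_aug_samples augmented_data)

-- ===== LEMMAS AND PROOFS =====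
lemma foldl_counts (l : List (Int × Int × String)) (p n : Int) :
    l.foldl
      (fun (acc : Int × Int) item =>
        if item.2.2 == "Positive" then (acc.1 + 1, acc.2)
        else if item.2.2 == "Negative" then (acc.1, acc.2 + 1)
        else acc)
      (p, n)
    = (p + ((l.map (fun item => item.2.2)).count "Positive" : Int),
       n + ((l.map (fun item => item.2.2)).count "Negative" : Int)) := by
  induction l generalizing p n with
  | nil => simp
  | cons x xs ih =>
    simp only [List.foldl_cons, List.map_cons, List.count_cons]
    split_ifs with h1 h2 <;> rw [ih] <;> simp_all <;> ring

-- ===== VERDICT =====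
theorem counting_aug_samples_spec : Claim_equal_counting_aug_samples := by
  intro l _
  unfold Spec_counting_aug_samples counting_aug_samples counting_aug_samples_alt
  simp only [foldl_counts, PySem.List.count_eq]
  simp
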